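-- pv_equiv track=rewrite | github.com/madpsy/aisdecode | tools/ais_generator.py | ais_text_to_binary
-- ===== SOURCE A (Python) =====
-- def ais_text_to_binary(text, length):
--     """
--     Convert an ASCII text string to a binary string using the AIS 6-bit encoding table.
--     The text will be padded or truncated to exactly `length` characters.
--     """
--     # AIS 6-bit alphabet as defined in the standard.
--     ais_table = "@ABCDEFGHIJKLMNOPQRSTUVWXYZ[\\]^_ !\"#$%&'()*+,-./0123456789:;<=>?"
--     text = text.upper()
--     if len(text) < length:
--         text = text + " " * (length - len(text))
--     else:
--         text = text[:length]
--     bin_str = ""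
--     for ch in text:
--         try:
--             idx = ais_table.index(ch)
--         except ValueError:
--             # If character not found, treat as a space.
--             idx = ais_table.index(" ")
--         bin_str += format(idx, '06b')
--     return bin_str
-- ===== SOURCE B (Python) =====
-- def ais_text_to_binary(text, length):
--     """
--     Convert an ASCII text string to a binary string using the AIS 6-bit encoding.
--     The text is padded or truncated to exactly `length` characters (same preamble
--     as the original); the 6-bit code is computed arithmetically from the ordinal
--     instead of scanning a lookup table, and the bits are built by repeated
--     halving instead of format().
--     """
--     text = text.upper()
--     if len(text) < length:
--         text = text + " " * (length - len(text))
--     else: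
--         text = text[:length]
--
--     def six(idx):
--         bits = ""
--         for _ in range(6):
--             bits = chr(48 + (idx & 1)) + bits
--             idx >>= 1
--         return bits
--
--     return "".join(
--         six(ord(ch) & 63 if 32 <= ord(ch) <= 95 else 32) for ch in text
--     )
-- ===== Notes on version B (the rewrite author's own statement) =====
-- stated objective: simpler
-- what changed: The 64-char AIS table and the try/except index search are replaced by a closed-form arithmetic mapping (ord&63 for ords 32-95, else 32) and the 6-bit chunk is built by repeated halving instead of format(); only the pad/truncate preamble is kept.
import Mathlib
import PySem

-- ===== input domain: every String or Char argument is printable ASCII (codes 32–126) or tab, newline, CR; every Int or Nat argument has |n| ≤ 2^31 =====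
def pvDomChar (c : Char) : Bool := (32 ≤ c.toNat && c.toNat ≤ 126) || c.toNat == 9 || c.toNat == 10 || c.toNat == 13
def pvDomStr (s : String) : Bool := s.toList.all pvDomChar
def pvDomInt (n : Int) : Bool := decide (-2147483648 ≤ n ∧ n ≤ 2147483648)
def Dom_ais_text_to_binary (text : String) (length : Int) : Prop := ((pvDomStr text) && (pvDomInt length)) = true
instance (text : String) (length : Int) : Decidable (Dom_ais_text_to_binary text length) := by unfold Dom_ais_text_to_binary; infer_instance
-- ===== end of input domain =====

-- B keeps the pad/truncate preamble and replaces the table lookup by a closed-form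
-- arithmetic mapping, building the 6-bit chunk by repeated halving (objective: simpler).

-- ===== PORT A =====
-- the AIS 6-bit alphabet string literal
def aisTable : List Char :=
  "@ABCDEFGHIJKLMNOPQRSTUVWXYZ[\\]^_ !\"#$%&'()*+,-./0123456789:;<=>?".toList

-- format(idx, '06b'): binary digits, left-padded with '0' to width 6 (exact for idx ≥ 0)
def fmt06b (idx : Nat) : List Char := PySem.Chars.zfill (Nat.toDigits 2 idx) 6

def ais_text_to_binary (text : String) (length : Int) : String :=
  let t0 := PySem.Chars.upper text.toList
  let t := if (PySem.Chars.len t0 : Int) < length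
           then t0 ++ PySem.List.pyRepeat [' '] (length - PySem.Chars.len t0)
           else PySem.List.slice t0 none (some length)
  String.ofList (t.foldl (fun acc ch =>
    let f := PySem.Chars.find aisTable [ch]          -- ais_table.index(ch); ValueError ↔ find = -1
    let idx := if f = -1 then (PySem.Chars.find aisTable [' ']).toNat else f.toNat
    acc ++ fmt06b idx) [])

-- ===== PORT B =====
-- six(idx): bits built least-significant-first by repeated halving (idx & 1, idx >>= 1)
def sixBits (idx : Nat) : List Char :=
  ((List.range 6).foldl (fun (st : List Char × Nat) _ =>
      (Char.ofNat (48 + st.2 % 2) :: st.1, st.2 / 2)) ([], idx)).1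

def ais_text_to_binary_alt (text : String) (length : Int) : String :=
  let t0 := PySem.Chars.upper text.toList
  let t := if (PySem.Chars.len t0 : Int) < length
           then t0 ++ PySem.List.pyRepeat [' '] (length - PySem.Chars.len t0)
           else PySem.List.slice t0 none (some length)
  String.ofList (PySem.Chars.join []
    (t.map (fun ch => sixBits (if 32 ≤ ch.toNat ∧ ch.toNat ≤ 95 then ch.toNat % 64 else 32))))

-- ===== PRECONDITION & SPEC =====
def Spec_ais_text_to_binary (text : String) (length : Int) (out : String) : Prop := out = ais_text_to_binary_alt text length
instance (text : String) (length : Int) (out : String) : Decidable (Spec_ais_text_to_binary text length out) := by unfold Spec_ais_text_to_binary; infer_instance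

-- ===== CLAIM (what is proved, stated in full; the proofs are below) =====
def Claim_equal_ais_text_to_binary : Prop := ∀ (text : String) (length : Int), Dom_ais_text_to_binary text length → Spec_ais_text_to_binary text length (ais_text_to_binary text length)

-- ===== LEMMAS AND PROOFS =====

-- A's per-character encoding agrees with B's on every code point below 127
set_option maxHeartbeats 4000000 in
set_option maxRecDepth 10000 in
lemma allChars : ∀ n, n < 127 →
    (fmt06b (if PySem.Chars.find aisTable [Char.ofNat n] = -1
             then (PySem.Chars.find aisTable [' ']).toNat
             else (PySem.Chars.find aisTable [Char.ofNat n]).toNat)) =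
    sixBits (if 32 ≤ (Char.ofNat n).toNat ∧ (Char.ofNat n).toNat ≤ 95
             then (Char.ofNat n).toNat % 64 else 32) := by decide

lemma join_nil_flatten : ∀ l : List (List Char), PySem.Chars.join [] l = l.flatten
  | [] => rfl
  | [a] => by simp [PySem.Chars.join, List.intercalate]
  | a :: b :: t => by
      have ih := join_nil_flatten (b :: t)
      simp only [PySem.Chars.join, List.intercalate, List.flatten] at ih ⊢
      simpa using ih

lemma toNat_ofNat_lt (n : Nat) (h : n < 1000) : (Char.ofNat n).toNat = n := by
  have hv : n.isValidChar := Or.inl (by omega)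
  rw [Char.toNat_ofNat]; simp [hv]

lemma encode_eq (t : List Char) (h : ∀ c ∈ t, c.toNat < 127) :
    t.foldl (fun acc ch =>
      acc ++ fmt06b (if PySem.Chars.find aisTable [ch] = -1
                     then (PySem.Chars.find aisTable [' ']).toNat
                     else (PySem.Chars.find aisTable [ch]).toNat)) [] =
    PySem.Chars.join []
      (t.map (fun ch => sixBits (if 32 ≤ ch.toNat ∧ ch.toNat ≤ 95 then ch.toNat % 64 else 32))) := by
  rw [PySem.List.foldl_append_eq_flatMap, join_nil_flatten, List.nil_append]
  induction t with
  | nil => simp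
  | cons c t ih =>
      simp only [List.flatMap_cons, List.map_cons, List.flatten_cons]
      have hc := h c (by simp)
      have hcc := allChars c.toNat hc
      rw [Char.ofNat_toNat] at hcc
      rw [hcc, ih (fun x hx => h x (List.mem_cons_of_mem _ hx))]

lemma upper_lt (text : String) (hdom : pvDomStr text = true) :
    ∀ c ∈ PySem.Chars.upper text.toList, c.toNat < 127 := by
  intro c hc
  simp only [PySem.Chars.upper, List.mem_map] at hc
  obtain ⟨d, hd, rfl⟩ := hc
  have hdd : pvDomChar d = true := by
    unfold pvDomStr at hdom
    exact (List.all_eq_true.mp hdom) d hd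
  simp only [pvDomChar, Bool.or_eq_true, Bool.and_eq_true, decide_eq_true_eq, beq_iff_eq] at hdd
  unfold PySem.Chars.upperChar
  split
  · rename_i hl
    simp only [PySem.Chars.islower, Bool.and_eq_true, decide_eq_true_eq] at hl
    have h97 : 97 ≤ d.toNat := hl.1
    have h122 : d.toNat ≤ 122 := hl.2
    rw [toNat_ofNat_lt _ (by omega)]; omega
  · omega

-- ===== VERDICT (by name: the statement is the Claim_ definition above) =====
theorem ais_text_to_binary_spec : Claim_equal_ais_text_to_binary := by
  intro text length hdom
  simp only [Spec_ais_text_to_binary, ais_text_to_binary, ais_text_to_binary_alt]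
  have hdomS : pvDomStr text = true := by
    unfold Dom_ais_text_to_binary at hdom
    simp only [Bool.and_eq_true] at hdom
    exact hdom.1
  have ht0 := upper_lt text hdomS
  congr 1
  split
  · apply encode_eq
    intro c hc
    rcases List.mem_append.mp hc with h1 | h2
    · exact ht0 c h1
    · rw [PySem.List.pyRepeat_singleton] at h2
      rw [List.eq_of_mem_replicate h2]; decide
  · apply encode_eq
    intro c hc
    exact ht0 c (PySem.List.mem_of_mem_slice _ _ _ hc)
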